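-- pv_equiv track=rewrite | github.com/jjyjoy1/cdDNA_project | scripts/snakeutils/algn_algorithm.py | ukkonen
-- ===== SOURCE A (Python) =====
-- def ukkonen(text, pattern, k):
--     """
--     Perform an approximate pattern matching using a Ukkonen-like algorithm,
--     allowing up to k errors (substitutions, insertions, or deletions).
--
--     Parameters
--     ----------
--     text : str
--         Reference sequence (the 'haystack').
--     pattern : str
--         Query sequence to match (the 'needle').
--     k : int
--         Maximum permitted errors (sum of mismatches + indels).
--
--     Returns
--     -------
--     list of tuples
--         A list of (cost, end_position) where:
--           - cost is how many edits were required (<= k),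
--           - end_position is the ending index of the match in 'text'.
--         The matches are discovered while scanning through 'text'.
--
--     Notes
--     -----
--     - If either `text` or `pattern` is empty, no matches are returned.
--     - cost[j] is dynamically updated to track the edit distance
--       when aligning pattern up to index j with the current character
--       in text.
--     - This implementation slides along `text` one character at a time and
--       updates the cost array for each position in `pattern`.
--     """
--     if not text or not pattern:
--         return []
--
--     # cost[j] will track how many edits are needed to match pattern[:j+1]
--     # against the current portion of text.
--     # Initialize cost array for length = len(pattern).
--     cost = list(range(1, len(pattern) + 1))
--
--     # We'll keep track of “lact” as the rightmost position we’re still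
--     # allowed to check in the cost array (i.e., cost[lact] <= k).
--     # This helps skip positions that exceed the error threshold.
--     lact = min(k + 1, len(pattern) - 1)
--
--     hits = []
--
--     # Slide over each character in the text
--     for i, char_t in enumerate(text):
--         cost_diag = 0   # the cost for the previous diagonal cell
--         cost_ij = 0
--
--         # Update cost array from left to right
--         for j, char_p in enumerate(pattern):
--             # Record the old cost[j] to use as cost_diag in the next iteration
--             old_cost_j = cost[j]
--
--             # If the characters match exactly, cost_ij = cost_diag
--             # (no additional edits). Otherwise, add 1 for a mismatch.
--             if char_t == char_p:
--                 cost_ij = cost_diag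
--             else:
--                 # min(...) + 1 covers substitution, insertion, or deletion
--                 cost_ij = min(cost_ij, cost_diag, cost[j]) + 1
--
--             # Move cost_ij into cost[j], then store old cost_j in cost_diag
--             cost[j] = cost_ij
--             cost_diag = old_cost_j
--
--         # Try to adjust lact so we skip positions that can't produce a valid match
--         while lact >= 0 and cost[lact] > k:
--             lact -= 1
--         if lact < len(pattern) - 1:
--             lact += 1
--
--         # If we've progressed far enough along text that a match of pattern could
--         # fully “fit,” record it. The idea is that once i >= len(pattern)-1,
--         # we have a potential alignment that ends around i.
--         if i >= len(pattern) - 1 - k: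
--             # cost[lact] is a known distance, and lact points at the best feasible
--             # position or is at len(pattern)-1. So cost[lact] <= k is a valid match.
--             hits.append((cost[lact], i))
--
--     return hits
-- ===== SOURCE B (Python) =====
-- def ukkonen(text, pattern, k):
--     """Stateless two-pass column update: pass 1 takes diagonal/vertical
--     candidates, pass 2 propagates horizontal costs left to right; the
--     last active cell is recomputed from the column by a reverse scan
--     instead of A's carried lact counter."""
--     if not text or not pattern:
--         return []
--     m = len(pattern)
--     col = list(range(1, m + 1))
--     hits = []
--     for i, ct in enumerate(text):
--         # pass 1: diagonal / deletion candidates (a match copies the diagonal)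
--         diags = [0] + col[:-1]
--         col = [dg if ct == cp else min(dg, up) + 1
--                for cp, up, dg in zip(pattern, col, diags)]
--         # pass 2: propagate insertion costs; a match position keeps the diagonal
--         prev = col[0]
--         for j in range(1, m):
--             if ct != pattern[j] and prev + 1 < col[j]:
--                 col[j] = prev + 1
--             prev = col[j]
--         if i >= m - 1 - k:
--             # rightmost j with col[j] <= k (the last active cell), else -1
--             la = next((j for j in range(m - 1, -1, -1) if col[j] <= k), -1)
--             hits.append((col[min(la + 1, m - 1)], i))
--     return hits
-- ===== Notes on version B (the rewrite author's own statement) =====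
-- stated objective: alternative
-- what changed: B replaces A's single carry-loop column update and stateful lact counter by a stateless two-pass column update (pass 1: diagonal/vertical candidates via a zip comprehension; pass 2: left-to-right insertion propagation) and recomputes the last active cell from the column by a reverse scan at each hit instead of carrying lact across iterations.
import Mathlib
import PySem

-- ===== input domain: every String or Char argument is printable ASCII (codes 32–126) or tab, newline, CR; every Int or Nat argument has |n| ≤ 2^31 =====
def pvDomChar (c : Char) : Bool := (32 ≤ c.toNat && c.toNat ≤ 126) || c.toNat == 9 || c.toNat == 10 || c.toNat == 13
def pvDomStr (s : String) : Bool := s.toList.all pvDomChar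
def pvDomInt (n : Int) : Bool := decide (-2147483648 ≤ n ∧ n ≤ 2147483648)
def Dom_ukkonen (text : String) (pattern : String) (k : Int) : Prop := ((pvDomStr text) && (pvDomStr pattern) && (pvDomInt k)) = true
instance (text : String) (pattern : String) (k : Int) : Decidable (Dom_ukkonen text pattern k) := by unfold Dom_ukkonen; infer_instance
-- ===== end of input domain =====

-- B replaces A's single carry-loop column update + carried lact counter by a stateless
-- two-pass column update and a per-hit reverse scan for the last active cell; same output.

-- ===== PORT A =====
-- inner loop `for j, char_p in enumerate(pattern)`: carries (cost_diag, cost_ij)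
def ukkA_inner (ct : Char) : List Char → List Int → Int → Int → List Int
  | cp :: ps, c :: cs, cd, cij =>
      let cij' := if ct = cp then cd else min (min cij cd) c + 1
      cij' :: ukkA_inner ct ps cs c cij'
  | _, _, _, _ => []

-- `while lact >= 0 and cost[lact] > k: lact -= 1`; fuel (lact+1).toNat is exactly the
-- maximal number of decrements, so the fuel form computes the very same iteration
def ukkScanFuel (cost : List Int) (k : Int) : Nat → Int → Int
  | 0, lact => lact
  | fuel + 1, lact =>
      if 0 ≤ lact ∧ k < PySem.List.pyGetD cost lact 0 then ukkScanFuel cost k fuel (lact - 1)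
      else lact

def ukkScan (cost : List Int) (k : Int) (lact : Int) : Int :=
  ukkScanFuel cost k (lact + 1).toNat lact

-- `for i, char_t in enumerate(text)` with state (cost, lact), emitting hits
def ukkA_loop (p : List Char) (k : Int) : List Char → Nat → List Int → Int → List (Int × Int)
  | [], _, _, _ => []
  | ct :: ts, i, cost, lact =>
      let cost' := ukkA_inner ct p cost 0 0
      let l1 := ukkScan cost' k lact
      let l2 := if l1 < (p.length : Int) - 1 then l1 + 1 else l1
      (if (p.length : Int) - 1 - k ≤ (i : Int) then [(PySem.List.pyGetD cost' l2 0, (i : Int))] else [])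
        ++ ukkA_loop p k ts (i + 1) cost' l2

def ukkonen (text : String) (pattern : String) (k : Int) : List (Int × Int) :=
  if text.toList = [] ∨ pattern.toList = [] then []
  else
    ukkA_loop pattern.toList k text.toList 0
      (PySem.List.pyRange 1 ((pattern.toList.length : Int) + 1) 1)
      (min (k + 1) ((pattern.toList.length : Int) - 1))

-- ===== PORT B =====
-- pass 1: `[dg if ct == cp else min(dg, up) + 1 for cp, up, dg in zip(pattern, col, diags)]`
def ukkB_pass1 (ct : Char) : List Char → List Int → List Int → List Int
  | cp :: ps, up :: us, dg :: ds =>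
      (if ct = cp then dg else min dg up + 1) :: ukkB_pass1 ct ps us ds
  | _, _, _ => []

-- pass 2: `for j in range(1, m): if ct != pattern[j] and prev+1 < col[j]: col[j] = prev+1`,
-- applied to the tail of the column with prev running over the rewritten cells
def ukkB_pass2 (ct : Char) : Int → List Char → List Int → List Int
  | prev, cp :: ps, c :: cs =>
      let c' := if ct ≠ cp ∧ prev + 1 < c then prev + 1 else c
      c' :: ukkB_pass2 ct c' ps cs
  | _, _, cs => cs

-- one column step: diags = [0] + col[:-1], then pass 1 and pass 2 (head untouched)
def ukkB_col (ct : Char) (p : List Char) (col : List Int) : List Int :=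
  let col1 := ukkB_pass1 ct p col (0 :: col.dropLast)
  match p, col1 with
  | _ :: ps, c :: cs => c :: ukkB_pass2 ct c ps cs
  | _, _ => col1

-- `next((j for j in range(m-1, -1, -1) if col[j] <= k), -1)`: rightmost index with
-- value <= k, else -1, computed structurally from the right
def ukkB_lastLE (k : Int) : List Int → Int
  | [] => -1
  | c :: cs =>
      let r := ukkB_lastLE k cs
      if 0 ≤ r then r + 1 else if c ≤ k then 0 else -1

-- stateless text loop: only the column is carried
def ukkB_loop (p : List Char) (k : Int) : List Char → Nat → List Int → List (Int × Int)
  | [], _, _ => []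
  | ct :: ts, i, col =>
      let col' := ukkB_col ct p col
      (if (p.length : Int) - 1 - k ≤ (i : Int) then
        [(PySem.List.pyGetD col' (min (ukkB_lastLE k col' + 1) ((p.length : Int) - 1)) 0, (i : Int))]
      else [])
        ++ ukkB_loop p k ts (i + 1) col'

def ukkonen_alt (text : String) (pattern : String) (k : Int) : List (Int × Int) :=
  if text.toList = [] ∨ pattern.toList = [] then []
  else ukkB_loop pattern.toList k text.toList 0 (PySem.List.pyRange 1 ((pattern.toList.length : Int) + 1) 1)

-- ===== PRECONDITION & SPEC =====
def Spec_ukkonen (text : String) (pattern : String) (k : Int) (out : List (Int × Int)) : Prop := out = ukkonen_alt text pattern k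
instance (text : String) (pattern : String) (k : Int) (out : List (Int × Int)) : Decidable (Spec_ukkonen text pattern k out) := by unfold Spec_ukkonen; infer_instance

-- ===== CLAIM (what is proved, stated in full; the proofs are below) =====
def Claim_equal_ukkonen : Prop := ∀ (text : String) (pattern : String) (k : Int), Dom_ukkonen text pattern k → Spec_ukkonen text pattern k (ukkonen text pattern k)

-- ===== LEMMAS AND PROOFS =====

-- vertical adjacency predicate down a column (x = cell above, virtual row -1 = 0)
def Vp : Int → List Int → Prop
  | _, [] => True
  | x, c :: cs => (x - 1 ≤ c ∧ c ≤ x + 1) ∧ Vp c cs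

-- relation between consecutive columns: d = old cell one above, heads c (old) / c' (new):
-- diagonal monotonicity d ≤ c' ≤ d+1 and horizontal |c' - c| ≤ 1
def CrossP : Int → List Int → List Int → Prop
  | d, c :: cs, c' :: cs' => (d ≤ c' ∧ c' ≤ d + 1 ∧ c - 1 ≤ c' ∧ c' ≤ c + 1) ∧ CrossP c cs cs'
  | _, _, _ => True

lemma ukkA_inner_length (ct : Char) :
    ∀ (ps : List Char) (cs : List Int) (cd cij : Int),
      (ukkA_inner ct ps cs cd cij).length = min ps.length cs.length := by
  intro ps
  induction ps with
  | nil => intro cs cd cij; cases cs <;> simp [ukkA_inner]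
  | cons p ps ih =>
    intro cs cd cij
    cases cs with
    | nil => simp [ukkA_inner]
    | cons c cs => simp [ukkA_inner, ih]

lemma ukkA_inner_nonneg (ct : Char) :
    ∀ (ps : List Char) (cs : List Int) (cd cij : Int),
      0 ≤ cd → 0 ≤ cij → (∀ x ∈ cs, 0 ≤ x) →
      ∀ x ∈ ukkA_inner ct ps cs cd cij, 0 ≤ x := by
  intro ps
  induction ps with
  | nil => intro cs cd cij _ _ _ x hx; cases cs <;> simp [ukkA_inner] at hx
  | cons p ps ih =>
    intro cs cd cij hcd hcij hcs x hx
    cases cs with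
    | nil => simp [ukkA_inner] at hx
    | cons c cs =>
      have hc : 0 ≤ c := hcs c (by simp)
      simp only [ukkA_inner, List.mem_cons] at hx
      rcases hx with h | h
      · subst h; split_ifs <;> omega
      · exact ih cs c _ hc (by split_ifs <;> omega) (fun y hy => hcs y (by simp [hy])) x h

-- adjacency facts for a full-column step
lemma ukkA_inner_adj (ct : Char) :
    ∀ (ps : List Char) (cs : List Int) (cd cij : Int),
      Vp cd cs → cd - 1 ≤ cij → cij ≤ cd + 1 →
      Vp cij (ukkA_inner ct ps cs cd cij) ∧ CrossP cd cs (ukkA_inner ct ps cs cd cij) := by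
  intro ps
  induction ps with
  | nil =>
    intro cs cd cij _ _ _
    cases cs <;> simp [ukkA_inner, Vp, CrossP]
  | cons p ps ih =>
    intro cs cd cij hV h2 h3
    cases cs with
    | nil => simp [ukkA_inner, Vp, CrossP]
    | cons c cs =>
      obtain ⟨⟨hc1, hc2⟩, hVcs⟩ := hV
      show Vp cij ((if ct = p then cd else min (min cij cd) c + 1) ::
              ukkA_inner ct ps cs c (if ct = p then cd else min (min cij cd) c + 1)) ∧
           CrossP cd (c :: cs) ((if ct = p then cd else min (min cij cd) c + 1) ::
              ukkA_inner ct ps cs c (if ct = p then cd else min (min cij cd) c + 1))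
      set c' := if ct = p then cd else min (min cij cd) c + 1 with hc'
      have hb1 : c - 1 ≤ c' := by rw [hc']; split_ifs <;> omega
      have hb2 : c' ≤ c + 1 := by rw [hc']; split_ifs <;> omega
      have hb3 : cd ≤ c' := by rw [hc']; split_ifs <;> omega
      have hb4 : c' ≤ cd + 1 := by rw [hc']; split_ifs <;> omega
      have hb5 : cij - 1 ≤ c' := by rw [hc']; split_ifs <;> omega
      have hb6 : c' ≤ cij + 1 := by rw [hc']; split_ifs <;> omega
      obtain ⟨ihV, ihC⟩ := ih cs c c' hVcs hb1 hb2
      exact ⟨⟨⟨hb5, hb6⟩, ihV⟩, ⟨hb3, hb4, hb1, hb2⟩, ihC⟩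

lemma crossP_diag {d : Int} {cs cs' : List Int} (h : CrossP d cs cs')
    (hlen : cs.length = cs'.length) :
    ∀ j : Nat, j + 1 < cs'.length → cs.getD j 0 ≤ cs'.getD (j + 1) 0 := by
  induction cs generalizing d cs' with
  | nil =>
    intro j hj
    cases cs' with
    | nil => simp at hj
    | cons a b => simp at hlen
  | cons c cs ih =>
    intro j hj
    cases cs' with
    | nil => simp at hj
    | cons c' cs' =>
      obtain ⟨_, hrest⟩ := h
      have hlen' : cs.length = cs'.length := by simpa using hlen
      cases j with
      | zero =>
        cases cs' with
        | nil => simp at hj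
        | cons c'' cs'' =>
          cases cs with
          | nil => simp at hlen'
          | cons a as => simpa using hrest.1.1
      | succ j =>
        have := ih hrest hlen' j (by simpa using hj)
        simpa using this

-- scan facts
lemma ukkScanFuel_le (cost : List Int) (k : Int) :
    ∀ (fuel : Nat) (lact : Int), ukkScanFuel cost k fuel lact ≤ lact := by
  intro fuel
  induction fuel with
  | zero => intro lact; simp [ukkScanFuel]
  | succ fuel ih =>
    intro lact
    rw [ukkScanFuel]
    split_ifs with h
    · have := ih (lact - 1); omega
    · omega

lemma ukkScan_le (cost : List Int) (k lact : Int) : ukkScan cost k lact ≤ lact :=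
  ukkScanFuel_le cost k _ lact

lemma ukkScan_ge (cost : List Int) (k lact : Int) (h : -1 ≤ lact) :
    -1 ≤ ukkScan cost k lact := by
  have main : ∀ (fuel : Nat) (lact : Int), -1 ≤ lact → -1 ≤ ukkScanFuel cost k fuel lact := by
    intro fuel
    induction fuel with
    | zero => intro lact hl; simpa [ukkScanFuel] using hl
    | succ fuel ih =>
      intro lact hl
      rw [ukkScanFuel]
      split_ifs with hc
      · exact ih (lact - 1) (by omega)
      · omega
  exact main _ lact h

lemma ukkScan_stop (cost : List Int) (k lact : Int) (h : 0 ≤ ukkScan cost k lact) :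
    PySem.List.pyGetD cost (ukkScan cost k lact) 0 ≤ k := by
  have main : ∀ (fuel : Nat) (lact : Int), (lact + 1).toNat ≤ fuel →
      0 ≤ ukkScanFuel cost k fuel lact →
      PySem.List.pyGetD cost (ukkScanFuel cost k fuel lact) 0 ≤ k := by
    intro fuel
    induction fuel with
    | zero => intro lact hf h0; rw [ukkScanFuel] at h0 ⊢; omega
    | succ fuel ih =>
      intro lact hf h0
      rw [ukkScanFuel] at h0 ⊢
      split_ifs at h0 ⊢ with hc
      · exact ih (lact - 1) (by omega) h0
      · omega
  exact main _ lact le_rfl h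

lemma ukkScan_between (cost : List Int) (k lact : Int) :
    ∀ j : Int, ukkScan cost k lact < j → j ≤ lact → k < PySem.List.pyGetD cost j 0 := by
  have main : ∀ (fuel : Nat) (lact : Int),
      ∀ j : Int, ukkScanFuel cost k fuel lact < j → j ≤ lact →
      k < PySem.List.pyGetD cost j 0 := by
    intro fuel
    induction fuel with
    | zero => intro lact j hj1 hj2; rw [ukkScanFuel] at hj1; omega
    | succ fuel ih =>
      intro lact j hj1 hj2
      rw [ukkScanFuel] at hj1
      split_ifs at hj1 with hc
      · by_cases hje : j = lact
        · subst hje; exact hc.2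
        · exact ih (lact - 1) j hj1 (by omega)
      · omega
  exact main _ lact

lemma ukkScan_low (cost : List Int) (k lact : Int) (h : lact ≤ -1) :
    ukkScan cost k lact = lact := by
  unfold ukkScan
  have : (lact + 1).toNat = 0 := by omega
  rw [this, ukkScanFuel]

lemma ukkScan_zero (cost : List Int) (k : Int) (h : k < PySem.List.pyGetD cost 0 0) :
    ukkScan cost k 0 = -1 := by
  unfold ukkScan
  have : ((0 : Int) + 1).toNat = 1 := rfl
  rw [this, ukkScanFuel, if_pos ⟨le_rfl, h⟩, ukkScanFuel]
  norm_num

lemma pyGetD_toNat (xs : List Int) (i : Int) (h : 0 ≤ i) :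
    PySem.List.pyGetD xs i 0 = xs.getD i.toNat 0 :=
  PySem.List.pyGetD_of_nonneg xs 0 h

lemma ukk_getD_range (f : Nat → Int) (m j : Nat) (hj : j < m) :
    ((List.range m).map f).getD j 0 = f j := by
  rw [List.getD_eq_getElem _ _ (by simpa using hj)]
  simp

lemma vp_range (m : Nat) : ∀ x : Int, Vp x ((List.range m).map (fun (j : Nat) => x + 1 + (j : Int))) := by
  induction m with
  | zero => intro x; simp [Vp]
  | succ m ih =>
    intro x
    rw [List.range_succ_eq_map, List.map_cons, List.map_map]
    have h00 : x + 1 + ((0 : Nat) : Int) = x + 1 := by push_cast; ring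
    rw [h00]
    refine ⟨⟨by omega, by omega⟩, ?_⟩
    have he : ((List.range m).map ((fun (j : Nat) => x + 1 + (j : Int)) ∘ Nat.succ))
        = (List.range m).map (fun (j : Nat) => (x + 1) + 1 + (j : Int)) := by
      apply List.map_congr_left
      intro a _
      simp only [Function.comp]
      push_cast
      ring
    rw [he]
    exact ih (x + 1)

-- pass 1 does not look at the last entry of diags, so col[:-1] may be replaced by col
lemma pass1_dropLast (ct : Char) :
    ∀ (cs : List Int) (ps : List Char) (x : Int),
      ukkB_pass1 ct ps cs (x :: cs.dropLast) = ukkB_pass1 ct ps cs (x :: cs) := by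
  intro cs
  induction cs with
  | nil => intro ps x; cases ps <;> simp [ukkB_pass1]
  | cons up us ih =>
    intro ps x
    cases ps with
    | nil => simp [ukkB_pass1]
    | cons cp ps =>
      cases us with
      | nil => simp [ukkB_pass1]
      | cons b bs =>
        simp only [List.dropLast_cons_of_ne_nil (by simp : (b :: bs) ≠ []), ukkB_pass1]
        rw [ih ps up]

-- pass 2 after pass 1 computes exactly A's carry loop
lemma pass2_inner (ct : Char) :
    ∀ (ps : List Char) (cs : List Int) (cd prev : Int),
      ukkB_pass2 ct prev ps (ukkB_pass1 ct ps cs (cd :: cs)) = ukkA_inner ct ps cs cd prev := by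
  intro ps
  induction ps with
  | nil => intro cs cd prev; cases cs <;> simp [ukkB_pass1, ukkB_pass2, ukkA_inner]
  | cons cp ps ih =>
    intro cs cd prev
    cases cs with
    | nil => simp [ukkB_pass1, ukkB_pass2, ukkA_inner]
    | cons up us =>
      have hhead : (if ct ≠ cp ∧ prev + 1 < (if ct = cp then cd else min cd up + 1)
            then prev + 1 else (if ct = cp then cd else min cd up + 1))
          = (if ct = cp then cd else min (min prev cd) up + 1) := by
        by_cases hc : ct = cp
        · simp [hc]
        · rw [if_neg hc, if_neg hc]
          by_cases hp2 : prev + 1 < min cd up + 1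
          · rw [if_pos ⟨hc, hp2⟩]; omega
          · rw [if_neg (by tauto)]; omega
      show (if ct ≠ cp ∧ prev + 1 < (if ct = cp then cd else min cd up + 1)
            then prev + 1 else (if ct = cp then cd else min cd up + 1)) ::
          ukkB_pass2 ct (if ct ≠ cp ∧ prev + 1 < (if ct = cp then cd else min cd up + 1)
            then prev + 1 else (if ct = cp then cd else min cd up + 1)) ps
            (ukkB_pass1 ct ps us (up :: us))
        = (if ct = cp then cd else min (min prev cd) up + 1) ::
          ukkA_inner ct ps us up (if ct = cp then cd else min (min prev cd) up + 1)
      rw [hhead, ih]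

lemma ukkB_col_eq (ct : Char) (cp : Char) (ps : List Char) (up : Int) (us : List Int) :
    ukkB_col ct (cp :: ps) (up :: us) = ukkA_inner ct (cp :: ps) (up :: us) 0 0 := by
  have e0 : ukkB_col ct (cp :: ps) (up :: us)
      = (if ct = cp then (0 : Int) else min 0 up + 1)
        :: ukkB_pass2 ct (if ct = cp then (0 : Int) else min 0 up + 1) ps
            (ukkB_pass1 ct ps us (up :: us)) := by
    unfold ukkB_col
    rw [pass1_dropLast]
    rfl
  rw [e0, pass2_inner]
  show _ = (if ct = cp then (0 : Int) else min (min 0 0) up + 1)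
      :: ukkA_inner ct ps us up (if ct = cp then (0 : Int) else min (min 0 0) up + 1)
  have he : (if ct = cp then (0 : Int) else min (min 0 0) up + 1)
      = (if ct = cp then (0 : Int) else min 0 up + 1) := by split_ifs <;> omega
  rw [he]

-- ukkB_lastLE facts
lemma lastLE_lb (k : Int) : ∀ cs : List Int, -1 ≤ ukkB_lastLE k cs := by
  intro cs
  induction cs with
  | nil => simp [ukkB_lastLE]
  | cons c cs ih =>
    show -1 ≤ (let r := ukkB_lastLE k cs; if 0 ≤ r then r + 1 else if c ≤ k then 0 else -1)
    simp only
    split_ifs <;> omega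

lemma lastLE_lt_len (k : Int) : ∀ cs : List Int, ukkB_lastLE k cs < cs.length := by
  intro cs
  induction cs with
  | nil => simp [ukkB_lastLE]
  | cons c cs ih =>
    show (let r := ukkB_lastLE k cs; if 0 ≤ r then r + 1 else if c ≤ k then 0 else -1)
        < ((c :: cs).length : Int)
    simp only [List.length_cons]
    split_ifs <;> push_cast <;> omega

lemma lastLE_le_val (k : Int) :
    ∀ cs : List Int, 0 ≤ ukkB_lastLE k cs → cs.getD (ukkB_lastLE k cs).toNat 0 ≤ k := by
  intro cs
  induction cs with
  | nil => simp [ukkB_lastLE]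
  | cons c cs ih =>
    intro h
    show (c :: cs).getD (ukkB_lastLE k (c :: cs)).toNat 0 ≤ k
    by_cases hr : 0 ≤ ukkB_lastLE k cs
    · have he : ukkB_lastLE k (c :: cs) = ukkB_lastLE k cs + 1 := by
        show (let r := ukkB_lastLE k cs; if 0 ≤ r then r + 1 else if c ≤ k then 0 else -1) = _
        simp [hr]
      rw [he]
      have ht : (ukkB_lastLE k cs + 1).toNat = (ukkB_lastLE k cs).toNat + 1 := by omega
      rw [ht, List.getD_cons_succ]
      exact ih hr
    · by_cases hck : c ≤ k
      · have he : ukkB_lastLE k (c :: cs) = 0 := by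
          show (let r := ukkB_lastLE k cs; if 0 ≤ r then r + 1 else if c ≤ k then 0 else -1) = _
          simp [hr, hck]
        rw [he]; simpa using hck
      · have he : ukkB_lastLE k (c :: cs) = -1 := by
          show (let r := ukkB_lastLE k cs; if 0 ≤ r then r + 1 else if c ≤ k then 0 else -1) = _
          simp [hr, hck]
        rw [he] at h; omega

lemma lastLE_gt (k : Int) :
    ∀ (cs : List Int) (j : Nat), ukkB_lastLE k cs < (j : Int) → j < cs.length →
      k < cs.getD j 0 := by
  intro cs
  induction cs with
  | nil => intro j _ hj; simp at hj
  | cons c cs ih =>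
    intro j hgt hj
    have hdef : ukkB_lastLE k (c :: cs)
        = (if 0 ≤ ukkB_lastLE k cs then ukkB_lastLE k cs + 1 else if c ≤ k then 0 else -1) := rfl
    cases j with
    | zero =>
      rw [hdef] at hgt
      split_ifs at hgt with h1 h2
      · have := lastLE_lb k cs; omega
      · omega
      · simpa using (by omega : k < c)
    | succ j =>
      rw [List.getD_cons_succ]
      apply ih j _ (by simpa using hj)
      rw [hdef] at hgt
      have := lastLE_lb k cs
      split_ifs at hgt <;> push_cast at hgt ⊢ <;> omega

lemma lastLE_all_gt (k : Int) :
    ∀ cs : List Int, (∀ x ∈ cs, k < x) → ukkB_lastLE k cs = -1 := by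
  intro cs
  induction cs with
  | nil => simp [ukkB_lastLE]
  | cons c cs ih =>
    intro h
    show (let r := ukkB_lastLE k cs; if 0 ≤ r then r + 1 else if c ≤ k then 0 else -1) = -1
    have h1 := ih (fun x hx => h x (by simp [hx]))
    have h2 : ¬ c ≤ k := by have := h c (by simp); omega
    simp [h1, h2]

-- the simulation invariant on A's state (col, L) at text index i; B carries only col
def UkkInv (k : Int) (m : Nat) (col : List Int) (L : Int) (i : Nat) : Prop :=
  col.length = m ∧ Vp 0 col ∧ (∀ x ∈ col, 0 ≤ x) ∧
  ((0 ≤ k ∧ 0 ≤ L ∧ L ≤ (m : Int) - 1 ∧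
      (L = (m : Int) - 1 ∨ ∀ j : Nat, L ≤ (j : Int) → j < m → k < col.getD j 0))
   ∨ (k < 0 ∧ L ≤ 0 ∧ (L < -1 → L = k + 1 + (i : Int))))

lemma getD_mem (cs : List Int) (j : Nat) (hj : j < cs.length) : cs.getD j 0 ∈ cs := by
  rw [List.getD_eq_getElem _ _ hj]
  exact List.getElem_mem _

lemma loop_eq (p : List Char) (k : Int) (hp : p ≠ []) :
    ∀ (ts : List Char) (i : Nat) (col : List Int) (L : Int),
      UkkInv k p.length col L i →
      ukkA_loop p k ts i col L = ukkB_loop p k ts i col := by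
  intro ts
  induction ts with
  | nil => intro i col L hInv; rfl
  | cons ct ts ih =>
    intro i col L hInv
    obtain ⟨hlen, hV, hNN, hS⟩ := hInv
    have hm : 0 < p.length := by cases p with | nil => exact absurd rfl hp | cons a l => simp
    obtain ⟨cp, ps, hpe⟩ : ∃ cp ps, p = cp :: ps := by
      cases p with | nil => exact absurd rfl hp | cons a l => exact ⟨a, l, rfl⟩
    obtain ⟨up, us, hce⟩ : ∃ up us, col = up :: us := by
      cases col with
      | nil => simp [hpe] at hlen
      | cons a l => exact ⟨a, l, rfl⟩
    simp only [ukkA_loop, ukkB_loop]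
    have hcol : ukkB_col ct p col = ukkA_inner ct p col 0 0 := by
      rw [hpe, hce]; exact ukkB_col_eq ct cp ps up us
    rw [hcol]
    set m := p.length with hmdef
    set col' := ukkA_inner ct p col 0 0 with hcol'
    have hlen' : col'.length = m := by
      rw [hcol', ukkA_inner_length]; omega
    obtain ⟨hV', hX⟩ := ukkA_inner_adj ct p col 0 0 hV (by omega) (by omega)
    rw [← hcol'] at hV' hX
    have hNN' : ∀ x ∈ col', 0 ≤ x := by
      rw [hcol']; exact ukkA_inner_nonneg ct p col 0 0 le_rfl le_rfl hNN
    set l1 := ukkScan col' k L with hl1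
    set l2 := if l1 < (m : Int) - 1 then l1 + 1 else l1 with hl2
    set la := ukkB_lastLE k col' with hla
    rcases hS with ⟨hk0, hL0, hLm, hSr⟩ | ⟨hkneg, hL0, hLlow⟩
    · -- k ≥ 0 branch
      have habove : ∀ j : Nat, L < (j : Int) → j < m → k < col'.getD j 0 := by
        intro j h1 h2
        rcases hSr with hEq | hAll
        · omega
        · cases j with
          | zero => omega
          | succ j' =>
            have hd := crossP_diag hX (by omega) j' (by omega)
            have := hAll j' (by omega) (by omega)
            omega
      have hl1le : l1 ≤ L := by rw [hl1]; exact ukkScan_le _ _ _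
      have hl1ge : -1 ≤ l1 := by rw [hl1]; exact ukkScan_ge _ _ _ (by omega)
      have hlaeq : la = l1 := by
        have hge : l1 ≤ la := by
          by_cases h0 : 0 ≤ l1
          · by_contra hlt
            have hgt := lastLE_gt k col' l1.toNat (by rw [← hla]; omega) (by omega)
            have hstop := ukkScan_stop col' k L (by rw [← hl1]; exact h0)
            rw [← hl1, pyGetD_toNat _ _ h0] at hstop
            omega
          · have := lastLE_lb k col'; rw [← hla] at this; omega
        have hle : la ≤ l1 := by
          by_contra hlt
          have h0 : 0 ≤ la := by omega
          have hval := lastLE_le_val k col' (by rw [← hla]; omega)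
          rw [← hla] at hval
          by_cases hcase : la ≤ L
          · have hbt := ukkScan_between col' k L la (by rw [← hl1]; omega) hcase
            rw [pyGetD_toNat _ _ h0] at hbt
            omega
          · have hlt2 : la < (m : Int) := by
              have := lastLE_lt_len k col'; rw [← hla, hlen'] at this; exact_mod_cast this
            have := habove la.toNat (by omega) (by omega)
            omega
        omega
      have hidx : l2 = min (la + 1) ((m : Int) - 1) := by
        rw [hl2, hlaeq]
        split_ifs <;> omega
      have hInv' : UkkInv k m col' l2 (i + 1) := by
        refine ⟨hlen', hV', hNN', Or.inl ⟨hk0, ?_, ?_, ?_⟩⟩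
        · rw [hl2]; split_ifs <;> omega
        · rw [hl2]; split_ifs <;> omega
        · by_cases hend : l2 = (m : Int) - 1
          · exact Or.inl hend
          · right
            intro j hj1 hj2
            apply lastLE_gt k col' j ?_ (by omega)
            rw [← hla, hlaeq]
            rw [hl2] at hj1 hend
            split_ifs at hj1 hend <;> omega
      rw [ih (i + 1) col' l2 hInv', hidx]
    · -- k < 0 branch
      have hallgt : ∀ x ∈ col', k < x := fun x hx => by have := hNN' x hx; omega
      have hlam : la = -1 := by rw [hla]; exact lastLE_all_gt k col' hallgt
      by_cases hlow : L < -1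
      · -- lact still climbing from below; no hit can be emitted yet
        have hl1e : l1 = L := by rw [hl1]; exact ukkScan_low _ _ _ (by omega)
        have hl2e : l2 = L + 1 := by rw [hl2, hl1e]; split_ifs <;> omega
        have hi : ¬ ((m : Int) - 1 - k ≤ (i : Int)) := by
          have := hLlow hlow; omega
        rw [if_neg hi, if_neg hi]
        have hInv' : UkkInv k m col' l2 (i + 1) := by
          refine ⟨hlen', hV', hNN', Or.inr ⟨hkneg, by omega, fun h => ?_⟩⟩
          rw [hl2e]
          have := hLlow hlow
          push_cast
          omega
        rw [ih (i + 1) col' l2 hInv']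
      · -- L ∈ {-1, 0}: scan lands at -1, bump to 0; B's reverse scan gives -1 as well
        have hl1e : l1 = -1 := by
          have : L = -1 ∨ L = 0 := by omega
          rcases this with h | h
          · rw [hl1, h]; exact ukkScan_low _ _ _ (by omega)
          · rw [hl1, h]
            apply ukkScan_zero
            rw [pyGetD_toNat _ _ le_rfl]
            have hmem := getD_mem col' 0 (by omega)
            have := hallgt _ hmem
            simpa using this
        have hl2e : l2 = 0 := by rw [hl2, hl1e]; split_ifs <;> omega
        have hidx : l2 = min (la + 1) ((m : Int) - 1) := by rw [hl2e, hlam]; omega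
        have hInv' : UkkInv k m col' l2 (i + 1) := by
          exact ⟨hlen', hV', hNN', Or.inr ⟨hkneg, by omega, fun h => by omega⟩⟩
        rw [ih (i + 1) col' l2 hInv', hidx]

lemma inv_init (p : List Char) (k : Int) (hp : p ≠ []) :
    UkkInv k p.length
      (PySem.List.pyRange 1 ((p.length : Int) + 1) 1)
      (min (k + 1) ((p.length : Int) - 1)) 0 := by
  have hm : 0 < p.length := by cases p with | nil => exact absurd rfl hp | cons a l => simp
  have hA : PySem.List.pyRange 1 ((p.length : Int) + 1) 1
      = (List.range p.length).map (fun (j : Nat) => 1 + (j : Int)) := by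
    rw [PySem.List.pyRange_one]
    have : ((p.length : Int) + 1 - 1).toNat = p.length := by omega
    rw [this]
  refine ⟨?_, ?_, ?_, ?_⟩
  · rw [hA]; simp
  · rw [hA]
    have := vp_range p.length 0
    simpa using this
  · rw [hA]
    intro x hx
    simp only [List.mem_map, List.mem_range] at hx
    obtain ⟨j, _, rfl⟩ := hx
    omega
  · by_cases hk : 0 ≤ k
    · left
      refine ⟨hk, by omega, by omega, ?_⟩
      by_cases hend : k + 1 ≥ (p.length : Int) - 1
      · left; omega
      · right
        intro j hj1 hj2
        rw [hA, ukk_getD_range _ _ _ hj2]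
        omega
    · right
      refine ⟨by omega, by omega, fun h => by omega⟩

-- ===== VERDICT (by name: the statement is the Claim_ definition above) =====
theorem ukkonen_spec : Claim_equal_ukkonen := by
  intro text pattern k _hdom
  unfold Spec_ukkonen ukkonen ukkonen_alt
  by_cases h : text.toList = [] ∨ pattern.toList = []
  · rw [if_pos h, if_pos h]
  · rw [if_neg h, if_neg h]
    rw [not_or] at h
    exact loop_eq pattern.toList k h.2 text.toList 0 _ _ (inv_init pattern.toList k h.2)
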